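-- pv_equiv track=rewrite | github.com/OmeirK/pocket_sucos_code | get_d3i_alignment.py | format_alignment
-- ===== SOURCE A (Python) =====
-- def format_alignment(qaln, taln, midline, qstart, tstart, line_len=80):
--     """Format a pairwise alignment block like the foldseek HTML viewer."""
--     lines = []
--     qpos = int(qstart)
--     tpos = int(tstart)
--     for offset in range(0, len(qaln), line_len):
--         q_chunk = qaln[offset:offset + line_len]
--         m_chunk = midline[offset:offset + line_len]
--         t_chunk = taln[offset:offset + line_len]
--
--         q_residues = sum(1 for c in q_chunk if c != "-")
--         t_residues = sum(1 for c in t_chunk if c != "-")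
--
--         pad = max(len(str(qpos + q_residues)), len(str(tpos + t_residues))) + 1
--         lines.append(f"Q {qpos:<{pad}} {q_chunk}")
--         lines.append(f"  {'':<{pad}} {m_chunk}")
--         lines.append(f"T {tpos:<{pad}} {t_chunk}")
--         lines.append("")
--
--         qpos += q_residues
--         tpos += t_residues
--     return "\n".join(lines)
-- ===== SOURCE B (Python) =====
-- def format_alignment(qaln, taln, midline, qstart, tstart, line_len=80):
--     """Format a pairwise alignment block like the foldseek HTML viewer.
--
--     Different structure: residue positions come from precomputed prefix sums of
--     non-gap characters (no running counters), and each chunk is addressed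
--     directly by its index k, so every chunk's start/end coordinates are a pure
--     lookup qstart + qpre[...] / tstart + tpre[...]."""
--     def prefix(s):
--         acc = [0]
--         for c in s:
--             acc.append(acc[-1] + (c != "-"))
--         return acc
--
--     qpre, tpre = prefix(qaln), prefix(taln)
--     n, lt = len(qaln), len(taln)
--     nchunks = -(-n // line_len) if line_len > 0 else 0
--     out = []
--     for k in range(nchunks):
--         lo, hi = k * line_len, k * line_len + line_len
--         qs = qstart + qpre[min(lo, n)]
--         qe = qstart + qpre[min(hi, n)]
--         ts = tstart + tpre[min(lo, lt)]
--         te = tstart + tpre[min(hi, lt)]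
--         pad = max(len(str(qe)), len(str(te))) + 1
--         out.append(f"Q {qs:<{pad}} {qaln[lo:hi]}")
--         out.append(f"  {'':<{pad}} {midline[lo:hi]}")
--         out.append(f"T {ts:<{pad}} {taln[lo:hi]}")
--         out.append("")
--     return "\n".join(out)
-- ===== Notes on version B (the rewrite author's own statement) =====
-- stated objective: alternative
-- what changed: B precomputes prefix sums of non-gap characters for qaln and taln, so each chunk's start/end coordinates are direct table lookups indexed by the chunk number instead of A's running qpos/tpos counters threaded through the loop.
import Mathlib
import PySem

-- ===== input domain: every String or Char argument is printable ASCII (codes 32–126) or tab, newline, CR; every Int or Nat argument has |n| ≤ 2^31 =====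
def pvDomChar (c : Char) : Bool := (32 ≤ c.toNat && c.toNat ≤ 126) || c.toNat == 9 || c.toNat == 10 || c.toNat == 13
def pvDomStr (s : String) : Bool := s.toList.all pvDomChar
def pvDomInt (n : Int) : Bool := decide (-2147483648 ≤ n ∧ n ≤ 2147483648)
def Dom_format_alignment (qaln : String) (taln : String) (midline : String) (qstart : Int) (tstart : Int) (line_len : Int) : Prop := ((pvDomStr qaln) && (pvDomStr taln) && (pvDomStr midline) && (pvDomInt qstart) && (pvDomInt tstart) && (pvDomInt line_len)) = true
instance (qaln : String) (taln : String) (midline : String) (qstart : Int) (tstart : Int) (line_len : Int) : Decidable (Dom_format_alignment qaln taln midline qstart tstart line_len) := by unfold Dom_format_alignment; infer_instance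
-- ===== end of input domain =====

-- B replaces A's running qpos/tpos counters by precomputed prefix sums of non-gap characters,
-- addressing each chunk directly by its index; same asymptotic cost, different structure.

-- ===== PORT A =====
-- str.ljust(pad): pad on the right with spaces up to width pad (Nat subtraction clamps, as ljust does)
def pvLjust (cs : List Char) (pad : Nat) : List Char := cs ++ List.replicate (pad - cs.length) ' '
-- pad = max(len(str(qend)), len(str(tend))) + 1
def pvPad (qend tend : Int) : Nat :=
  max (PySem.Int.toChars qend).length (PySem.Int.toChars tend).length + 1

-- one iteration of A's loop body: slice the three chunks, count residues, format the four lines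
def pvStepA (qa ta ma : List Char) (ll : Int) (st : List (List Char) × Int × Int) (off : Int) :
    List (List Char) × Int × Int :=
  let qc := PySem.List.slice qa (some off) (some (off + ll))
  let mc := PySem.List.slice ma (some off) (some (off + ll))
  let tc := PySem.List.slice ta (some off) (some (off + ll))
  let qr : Int := (qc.countP (fun c => c ≠ '-') : Int)
  let tr : Int := (tc.countP (fun c => c ≠ '-') : Int)
  let pad := pvPad (st.2.1 + qr) (st.2.2 + tr)
  (st.1 ++ [ 'Q' :: ' ' :: pvLjust (PySem.Int.toChars st.2.1) pad ++ ' ' :: qc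
           , ' ' :: ' ' :: List.replicate pad ' ' ++ ' ' :: mc
           , 'T' :: ' ' :: pvLjust (PySem.Int.toChars st.2.2) pad ++ ' ' :: tc
           , [] ],
   st.2.1 + qr, st.2.2 + tr)

def format_alignment (qaln : String) (taln : String) (midline : String) (qstart : Int) (tstart : Int) (line_len : Int) : String :=
  let st := (PySem.List.pyRange 0 (qaln.toList.length : Int) line_len).foldl
              (pvStepA qaln.toList taln.toList midline.toList line_len) ([], qstart, tstart)
  String.mk (PySem.Chars.join ['\n'] st.1)

-- ===== PORT B =====
-- prefix(s): acc = [0]; for c in s: acc.append(acc[-1] + (c != "-"))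
def pvPrefStep (acc : List Int) (c : Char) : List Int :=
  acc ++ [PySem.List.pyGetD acc (-1) 0 + (if c ≠ '-' then 1 else 0)]
def pvPrefix (cs : List Char) : List Int := cs.foldl pvPrefStep [0]

-- one iteration of B's loop body: chunk k's coordinates are pure prefix-sum lookups
def pvChunkLines (qa ta ma : List Char) (ll qstart tstart : Int) (qpre tpre : List Int) (k : Int) :
    List (List Char) :=
  let lo := k * ll
  let hi := k * ll + ll
  let qs := qstart + PySem.List.pyGetD qpre (min lo (qa.length : Int)) 0
  let qe := qstart + PySem.List.pyGetD qpre (min hi (qa.length : Int)) 0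
  let ts := tstart + PySem.List.pyGetD tpre (min lo (ta.length : Int)) 0
  let te := tstart + PySem.List.pyGetD tpre (min hi (ta.length : Int)) 0
  let pad := pvPad qe te
  [ 'Q' :: ' ' :: pvLjust (PySem.Int.toChars qs) pad ++ ' ' :: PySem.List.slice qa (some lo) (some hi)
  , ' ' :: ' ' :: List.replicate pad ' ' ++ ' ' :: PySem.List.slice ma (some lo) (some hi)
  , 'T' :: ' ' :: pvLjust (PySem.Int.toChars ts) pad ++ ' ' :: PySem.List.slice ta (some lo) (some hi)
  , [] ]

def format_alignment_alt (qaln : String) (taln : String) (midline : String) (qstart : Int) (tstart : Int) (line_len : Int) : String :=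
  let qa := qaln.toList
  let ta := taln.toList
  let ma := midline.toList
  let qpre := pvPrefix qa
  let tpre := pvPrefix ta
  -- nchunks = -(-n // line_len) if line_len > 0 else 0
  let nchunks : Int := if line_len > 0 then -(PySem.Int.floordiv (-(qa.length : Int)) line_len) else 0
  let lines := (PySem.List.pyRange 0 nchunks 1).foldl
      (fun acc k => acc ++ pvChunkLines qa ta ma line_len qstart tstart qpre tpre k) []
  String.mk (PySem.Chars.join ['\n'] lines)

-- ===== PRECONDITION & SPEC =====
-- Pre_ excludes only line_len = 0, where Python's range(0, len, 0) raises ValueError in A.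
def Pre_format_alignment (qaln : String) (taln : String) (midline : String) (qstart : Int) (tstart : Int) (line_len : Int) : Prop := line_len ≠ 0
instance (qaln : String) (taln : String) (midline : String) (qstart : Int) (tstart : Int) (line_len : Int) : Decidable (Pre_format_alignment qaln taln midline qstart tstart line_len) := by unfold Pre_format_alignment; infer_instance
def pvWitness_format_alignment : String × String × String × Int × Int × Int := ("AC-G", "A-CG", "||||", 1, 1, 2)

def Spec_format_alignment (qaln : String) (taln : String) (midline : String) (qstart : Int) (tstart : Int) (line_len : Int) (out : String) : Prop := out = format_alignment_alt qaln taln midline qstart tstart line_len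
instance (qaln : String) (taln : String) (midline : String) (qstart : Int) (tstart : Int) (line_len : Int) (out : String) : Decidable (Spec_format_alignment qaln taln midline qstart tstart line_len out) := by unfold Spec_format_alignment; infer_instance

-- ===== CLAIM (what is proved, stated in full; the proofs are below) =====
def Claim_equal_format_alignment : Prop := ∀ (qaln : String) (taln : String) (midline : String) (qstart : Int) (tstart : Int) (line_len : Int), Dom_format_alignment qaln taln midline qstart tstart line_len → Pre_format_alignment qaln taln midline qstart tstart line_len → Spec_format_alignment qaln taln midline qstart tstart line_len (format_alignment qaln taln midline qstart tstart line_len)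

-- ===== LEMMAS AND PROOFS =====

-- running residue count: number of non-gap characters among the first m
def pvP (cs : List Char) (m : Nat) : Int := ((cs.take m).countP (fun c => c ≠ '-') : Int)

lemma pvPrefix_eq_map (cs : List Char) :
    pvPrefix cs = (List.range (cs.length + 1)).map (fun j => pvP cs j) := by
  induction cs using List.reverseRecOn with
  | nil => simp [pvPrefix, pvP]
  | append_singleton cs c ih =>
      have h1 : pvPrefix (cs ++ [c]) = pvPrefStep (pvPrefix cs) c := by
        simp [pvPrefix, List.foldl_append]
      rw [h1, ih, pvPrefStep]
      have h2 : (List.range (cs.length + 1)).map (fun j => pvP cs j)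
          = (List.range cs.length).map (fun j => pvP cs j) ++ [pvP cs cs.length] := by
        rw [List.range_succ, List.map_append]; simp
      rw [h2, PySem.List.pyGetD_neg_one_append_singleton]
      have h3 : (cs ++ [c]).length + 1 = (cs.length + 1) + 1 := by simp
      rw [h3, List.range_succ, List.map_append]
      congr 1
      · rw [← h2]
        apply List.map_congr_left
        intro j hj
        have hj' : j ≤ cs.length := by
          have := List.mem_range.mp hj; omega
        simp [pvP, List.take_append_of_le_length hj']
      · simp only [List.map_cons, List.map_nil]
        congr 1
        have h4 : (cs ++ [c]).take (cs.length + 1) = cs ++ [c] := by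
          apply List.take_of_length_le; simp
        have h5 : cs.take cs.length = cs := List.take_length
        simp [pvP, h4, h5, List.countP_append]

lemma pvPrefix_lookup (cs : List Char) (i : Int) (h : 0 ≤ i) :
    PySem.List.pyGetD (pvPrefix cs) (min i (cs.length : Int)) 0 = pvP cs i.toNat := by
  have hmin : min i (cs.length : Int) = ((min i.toNat cs.length : Nat) : Int) := by omega
  rw [hmin, PySem.List.pyGetD_natCast, pvPrefix_eq_map]
  have hlt : min i.toNat cs.length < cs.length + 1 := by omega
  rw [List.getD_eq_getElem?_getD, List.getElem?_map]
  simp only [List.getElem?_range hlt, Option.map_some, Option.getD_some]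
  rcases le_or_gt i.toNat cs.length with hle | hgt
  · simp [min_eq_left hle]
  · have hm : min i.toNat cs.length = cs.length := by omega
    rw [hm]
    simp [pvP, List.take_length, List.take_of_length_le (by omega : cs.length ≤ i.toNat)]

-- counts are additive across a chunk boundary
lemma pvP_add (cs : List Char) (a b : Nat) :
    pvP cs (a + b) = pvP cs a + (((cs.drop a).take b).countP (fun c => c ≠ '-') : Int) := by
  simp [pvP, List.take_add, List.countP_append]

-- one step of A, started at the prefix-sum coordinates, emits exactly B's chunk k
lemma pvStep_eq (qa ta ma : List Char) (L : Nat) (qstart tstart : Int) (k : Nat)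
    (acc : List (List Char)) :
    pvStepA qa ta ma (L : Int) (acc, qstart + pvP qa (k * L), tstart + pvP ta (k * L)) ((k * L : Nat) : Int)
      = (acc ++ pvChunkLines qa ta ma (L : Int) qstart tstart (pvPrefix qa) (pvPrefix ta) (k : Int),
         qstart + pvP qa ((k + 1) * L), tstart + pvP ta ((k + 1) * L)) := by
  have hc1 : (k : Int) * (L : Int) = ((k * L : Nat) : Int) := by push_cast; ring
  have hc2 : ((k * L : Nat) : Int) + (L : Int) = (((k + 1) * L : Nat) : Int) := by push_cast; ring
  have hslice : ∀ (xs : List Char),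
      PySem.List.slice xs (some ((k * L : Nat) : Int)) (some (((k * L : Nat) : Int) + (L : Int)))
        = (xs.drop (k * L)).take L := fun xs => PySem.List.slice_natCast_add xs (k * L) L
  have hlkQ : PySem.List.pyGetD (pvPrefix qa) (min ((k * L : Nat) : Int) (qa.length : Int)) 0
      = pvP qa (k * L) := by
    have := pvPrefix_lookup qa ((k * L : Nat) : Int) (by positivity)
    simpa using this
  have hlkT : PySem.List.pyGetD (pvPrefix ta) (min ((k * L : Nat) : Int) (ta.length : Int)) 0
      = pvP ta (k * L) := by
    have := pvPrefix_lookup ta ((k * L : Nat) : Int) (by positivity)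
    simpa using this
  have hlkQ' : PySem.List.pyGetD (pvPrefix qa) (min (((k * L : Nat) : Int) + (L : Int)) (qa.length : Int)) 0
      = pvP qa ((k + 1) * L) := by
    rw [hc2]
    have := pvPrefix_lookup qa (((k + 1) * L : Nat) : Int) (by positivity)
    simpa using this
  have hlkT' : PySem.List.pyGetD (pvPrefix ta) (min (((k * L : Nat) : Int) + (L : Int)) (ta.length : Int)) 0
      = pvP ta ((k + 1) * L) := by
    rw [hc2]
    have := pvPrefix_lookup ta (((k + 1) * L : Nat) : Int) (by positivity)
    simpa using this
  have hQ : qstart + pvP qa (k * L) + (((qa.drop (k * L)).take L).countP (fun c => c ≠ '-') : Int)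
      = qstart + pvP qa ((k + 1) * L) := by
    rw [show (k + 1) * L = k * L + L by ring, pvP_add]; ring
  have hT : tstart + pvP ta (k * L) + (((ta.drop (k * L)).take L).countP (fun c => c ≠ '-') : Int)
      = tstart + pvP ta ((k + 1) * L) := by
    rw [show (k + 1) * L = k * L + L by ring, pvP_add]; ring
  simp only [pvStepA, pvChunkLines, hc1, hslice, hlkQ, hlkT, hlkQ', hlkT', hQ, hT]

-- main invariant: A's fold over chunk offsets = B's chunk renderings, positions = prefix sums
lemma pvMainFold (qa ta ma : List Char) (L : Nat) (qstart tstart : Int) : ∀ (N : Nat),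
    (List.range N).foldl (fun st k => pvStepA qa ta ma (L : Int) st ((k * L : Nat) : Int)) ([], qstart, tstart)
      = ((List.range N).foldl
           (fun (acc : List (List Char)) (k : Nat) => acc ++ pvChunkLines qa ta ma (L : Int) qstart tstart (pvPrefix qa) (pvPrefix ta) (k : Int)) [],
         qstart + pvP qa (N * L), tstart + pvP ta (N * L)) := by
  intro N
  induction N with
  | zero => simp [pvP]
  | succ N ih =>
      rw [List.range_succ, List.foldl_append, List.foldl_append, ih,
        List.foldl_cons, List.foldl_nil, List.foldl_cons, List.foldl_nil, pvStep_eq]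

-- number of chunks: A's range(0, n, ll) length agrees with B's ceiling division, ll > 0
lemma pvNchunks (n : Nat) (ll : Int) (hll : 0 < ll) :
    (-(PySem.Int.floordiv (-(n : Int)) ll)).toNat
      = (if (0 : Int) < (n : Int) then (((n : Int) - 0 + ll - 1) / ll).toNat else 0) := by
  have hb := (PySem.Int.neg_floordiv_neg_eq_iff_of_pos (a := (n : Int)) (b := ll)
      (q := -(PySem.Int.floordiv (-(n : Int)) ll)) hll).mp rfl
  rcases Nat.eq_zero_or_pos n with hn | hn
  · subst hn
    have hz : PySem.Int.floordiv 0 ll = 0 := by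
      rw [PySem.Int.floordiv_eq_ediv_of_pos hll]; norm_num
    simp [hz]
  · have hn' : (0 : Int) < (n : Int) := by exact_mod_cast hn
    rw [if_pos hn']
    set q := ((n : Int) - 0 + ll - 1) / ll with hq
    have hdm := Int.ediv_add_emod ((n : Int) - 0 + ll - 1) ll
    have hr0 : 0 ≤ ((n : Int) - 0 + ll - 1) % ll := Int.emod_nonneg _ (by omega)
    have hr1 : ((n : Int) - 0 + ll - 1) % ll < ll := Int.emod_lt_of_pos _ hll
    have hq1 : (q - 1) * ll < (n : Int) := by nlinarith [hdm]
    have hq2 : (n : Int) ≤ q * ll := by nlinarith [hdm]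
    set p := -(PySem.Int.floordiv (-(n : Int)) ll) with hp
    have h1 : p - 1 < q := by nlinarith [hb.1, hb.2, hq1, hq2]
    have h2 : q - 1 < p := by nlinarith [hb.1, hb.2, hq1, hq2]
    omega

-- ll < 0: A's range(0, n, ll) is empty
lemma pvRange_neg_nil (n : Nat) (ll : Int) (h : ll < 0) :
    PySem.List.pyRange 0 (n : Int) ll = [] := by
  unfold PySem.List.pyRange
  have h0 : ¬ (ll = 0) := by omega
  have h1 : ¬ ((0 : Int) < ll) := by omega
  have h2 : ¬ ((n : Int) < 0) := by omega
  simp [h0, h1, h2]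

-- ===== VERDICT (by name: the statement is the Claim_ definition above) =====
theorem format_alignment_spec : Claim_equal_format_alignment := by
  intro qaln taln midline qstart tstart line_len _ hpre
  unfold Spec_format_alignment format_alignment format_alignment_alt
  rcases lt_trichotomy line_len 0 with hneg | h0 | hpos
  · rw [pvRange_neg_nil _ _ hneg]
    have hng : ¬ (line_len > 0) := by omega
    simp [hng]
  · exact absurd h0 hpre
  · -- positive step
    have hLcast : ((line_len.toNat : Nat) : Int) = line_len := by omega
    have hfa : (fun (st : List (List Char) × Int × Int) (k : Nat) =>
          pvStepA qaln.toList taln.toList midline.toList line_len st (0 + line_len * (k : Int)))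
        = (fun st k => pvStepA qaln.toList taln.toList midline.toList ((line_len.toNat : Nat) : Int) st ((k * line_len.toNat : Nat) : Int)) := by
      funext st k
      rw [hLcast]
      congr 1
      push_cast [hLcast]
      ring
    have hfb : (fun (acc : List (List Char)) (k : Nat) =>
          acc ++ pvChunkLines qaln.toList taln.toList midline.toList line_len qstart tstart
            (pvPrefix qaln.toList) (pvPrefix taln.toList) (0 + (k : Int)))
        = (fun (acc : List (List Char)) (k : Nat) => acc ++ pvChunkLines qaln.toList taln.toList midline.toList ((line_len.toNat : Nat) : Int) qstart tstart
            (pvPrefix qaln.toList) (pvPrefix taln.toList) (k : Int)) := by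
      funext acc k
      rw [hLcast, zero_add]
    have hN : ((-(PySem.Int.floordiv (-(qaln.toList.length : Int)) line_len)) - 0).toNat
        = (if (0 : Int) < (qaln.toList.length : Int)
            then (((qaln.toList.length : Int) - 0 + line_len - 1) / line_len).toNat else 0) := by
      rw [sub_zero]; exact pvNchunks qaln.toList.length line_len hpos
    rw [PySem.List.pyRange_of_pos _ _ hpos]
    simp only [gt_iff_lt, if_pos hpos]
    rw [PySem.List.pyRange_one, List.foldl_map, List.foldl_map, hN, hfa, hfb, pvMainFold]
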